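-- pv_equiv track=rewrite | github.com/aibtcdev/aibtcdev-backend | app/services/processing/stacks_chainhook_adapter/utils/helpers.py | validate_transaction_hash
-- ===== SOURCE A (Python) =====
-- def validate_transaction_hash(tx_hash: str) -> bool:
--     """Validate a transaction hash format.
--
--     Args:
--         tx_hash: Transaction hash to validate
--
--     Returns:
--         bool: True if hash format is valid
--     """
--     if not tx_hash:
--         return False
--
--     # Should start with 0x and be 64 hex characters
--     if not tx_hash.startswith("0x"):
--         return False
--
--     if len(tx_hash) != 66:  # 0x + 64 hex chars
--         return False
--
--     # Check if remaining characters are valid hex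
--     hex_part = tx_hash[2:]
--     return all(c in "0123456789abcdefABCDEF" for c in hex_part)
-- ===== SOURCE B (Python) =====
-- def _hex_run(chars, k):
--     # Exactly k hex characters, consuming the whole list.
--     if not chars:
--         return k == 0
--     if k == 0:
--         return False
--     c = chars[0]
--     if not ('0' <= c <= '9' or 'a' <= c <= 'f' or 'A' <= c <= 'F'):
--         return False
--     return _hex_run(chars[1:], k - 1)
--
--
-- def validate_transaction_hash(tx_hash: str) -> bool:
--     """Validate a transaction hash format: '0x' followed by exactly 64 hex chars."""
--     if not tx_hash:
--         return False
--     chars = list(tx_hash)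
--     if len(chars) >= 2 and chars[0] == '0' and chars[1] == 'x':
--         return _hex_run(chars[2:], 64)
--     return False
-- ===== Notes on version B (the rewrite author's own statement) =====
-- stated objective: alternative
-- what changed: A checks the prefix, then the total length, then a membership-in-string test over the tail; B is a single recursive matcher that consumes the two-character prefix and then exactly 64 characters classified by explicit range comparisons, with no separate length check.
import Mathlib
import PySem

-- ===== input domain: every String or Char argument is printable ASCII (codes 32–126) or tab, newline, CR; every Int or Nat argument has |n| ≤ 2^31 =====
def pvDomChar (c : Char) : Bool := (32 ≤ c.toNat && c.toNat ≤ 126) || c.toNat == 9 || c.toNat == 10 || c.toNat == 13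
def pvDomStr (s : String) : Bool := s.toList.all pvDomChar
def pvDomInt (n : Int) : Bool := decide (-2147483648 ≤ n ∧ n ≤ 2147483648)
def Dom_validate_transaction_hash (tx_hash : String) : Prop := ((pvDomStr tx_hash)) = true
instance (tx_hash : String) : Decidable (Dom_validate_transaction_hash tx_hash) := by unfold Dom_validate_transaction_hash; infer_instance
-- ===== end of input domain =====

-- B replaces A's prefix+length+membership checks by one recursive matcher with explicit
-- character-range comparisons (alternative decomposition, same cost).

-- ===== PORT A =====
def validate_transaction_hash (tx_hash : String) : Bool :=
  if PySem.Str.len tx_hash = 0 then false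
  else if !(PySem.Str.startswith tx_hash "0x") then false
  else if PySem.Str.len tx_hash ≠ 66 then false
  else
    -- hex_part = tx_hash[2:]; all(c in "0123456789abcdefABCDEF" for c in hex_part)
    (PySem.Str.slice tx_hash (some 2) none).toList.all
      (fun c => PySem.Chars.isIn [c] "0123456789abcdefABCDEF".toList)

-- ===== PORT B =====
-- '0' <= c <= '9' or 'a' <= c <= 'f' or 'A' <= c <= 'F'
def pvIsHexChar (c : Char) : Bool :=
  ('0' ≤ c && c ≤ '9') || ('a' ≤ c && c ≤ 'f') || ('A' ≤ c && c ≤ 'F')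

-- _hex_run: exactly k hex characters, consuming the whole list
def pvHexRun : List Char → Nat → Bool
  | [], k => k == 0
  | c :: rest, k =>
    match k with
    | 0 => false
    | k' + 1 => if !(pvIsHexChar c) then false else pvHexRun rest k'

def validate_transaction_hash_alt (tx_hash : String) : Bool :=
  if PySem.Str.len tx_hash = 0 then false
  else
    -- len(chars) >= 2 and chars[0] == '0' and chars[1] == 'x'
    match tx_hash.toList with
    | c0 :: c1 :: rest => if c0 == '0' && c1 == 'x' then pvHexRun rest 64 else false
    | _ => false

-- ===== PRECONDITION & SPEC =====
def Spec_validate_transaction_hash (tx_hash : String) (out : Bool) : Prop := out = validate_transaction_hash_alt tx_hash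
instance (tx_hash : String) (out : Bool) : Decidable (Spec_validate_transaction_hash tx_hash out) := by unfold Spec_validate_transaction_hash; infer_instance

-- ===== CLAIM (what is proved, stated in full; the proofs are below) =====
def Claim_equal_validate_transaction_hash : Prop := ∀ (tx_hash : String), Dom_validate_transaction_hash tx_hash → Spec_validate_transaction_hash tx_hash (validate_transaction_hash tx_hash)

-- ===== LEMMAS AND PROOFS =====

theorem pvIsHexChar_iff_mem (c : Char) :
    pvIsHexChar c = true ↔ c ∈ "0123456789abcdefABCDEF".toList := by
  have hl : "0123456789abcdefABCDEF".toList =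
      ['0','1','2','3','4','5','6','7','8','9','a','b','c','d','e','f',
       'A','B','C','D','E','F'] := rfl
  rw [hl]
  have hval : ∀ d : Char, c = d ↔ c.val.toNat = d.val.toNat := by
    intro d
    constructor
    · rintro rfl; rfl
    · intro h; exact Char.ext (UInt32.toNat_inj.mp h)
  have h0 : ('0').val.toNat = 48 := rfl
  have h1 : ('1').val.toNat = 49 := rfl
  have h2 : ('2').val.toNat = 50 := rfl
  have h3 : ('3').val.toNat = 51 := rfl
  have h4 : ('4').val.toNat = 52 := rfl
  have h5 : ('5').val.toNat = 53 := rfl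
  have h6 : ('6').val.toNat = 54 := rfl
  have h7 : ('7').val.toNat = 55 := rfl
  have h8 : ('8').val.toNat = 56 := rfl
  have h9 : ('9').val.toNat = 57 := rfl
  have h10 : ('a').val.toNat = 97 := rfl
  have h11 : ('b').val.toNat = 98 := rfl
  have h12 : ('c').val.toNat = 99 := rfl
  have h13 : ('d').val.toNat = 100 := rfl
  have h14 : ('e').val.toNat = 101 := rfl
  have h15 : ('f').val.toNat = 102 := rfl
  have h16 : ('A').val.toNat = 65 := rfl
  have h17 : ('B').val.toNat = 66 := rfl
  have h18 : ('C').val.toNat = 67 := rfl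
  have h19 : ('D').val.toNat = 68 := rfl
  have h20 : ('E').val.toNat = 69 := rfl
  have h21 : ('F').val.toNat = 70 := rfl
  simp only [pvIsHexChar, Bool.or_eq_true, Bool.and_eq_true, decide_eq_true_eq,
    Char.le_def, UInt32.le_iff_toNat_le, List.mem_cons, List.not_mem_nil, or_false, hval,
    h0, h1, h2, h3, h4, h5, h6, h7, h8, h9, h10, h11, h12, h13, h14, h15, h16, h17, h18, h19, h20, h21]
  omega

theorem isIn_singleton_iff_mem (c : Char) (l : List Char) :
    PySem.Chars.isIn [c] l = true ↔ c ∈ l := by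
  rw [PySem.Chars.isIn_iff_infix]
  constructor
  · intro h; exact List.singleton_sublist.mp h.sublist
  · intro h
    obtain ⟨s, t, rfl⟩ := List.append_of_mem h
    exact ⟨s, t, by simp⟩

theorem isIn_hex_eq_pvIsHexChar (c : Char) :
    PySem.Chars.isIn [c] "0123456789abcdefABCDEF".toList = pvIsHexChar c := by
  rw [Bool.eq_iff_iff, isIn_singleton_iff_mem, pvIsHexChar_iff_mem]

theorem pvHexRun_eq (l : List Char) :
    ∀ k, pvHexRun l k = (l.length == k && l.all pvIsHexChar) := by
  induction l with
  | nil => intro k; simp [pvHexRun, eq_comm]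
  | cons c rest ih =>
    intro k
    match k with
    | 0 => simp [pvHexRun]
    | k' + 1 =>
      simp only [pvHexRun, ih k', List.all_cons, List.length_cons]
      by_cases hc : pvIsHexChar c = true
      · simp [hc]
      · simp only [Bool.not_eq_true] at hc
        simp [hc]

-- ===== VERDICT (by name: the statement is the Claim_ definition above) =====
set_option maxHeartbeats 1000000 in
theorem validate_transaction_hash_spec : Claim_equal_validate_transaction_hash := by
  intro s _
  unfold Spec_validate_transaction_hash validate_transaction_hash validate_transaction_hash_alt
  match hcs : s.toList with
  | [] =>
    have hlen : PySem.Str.len s = 0 := by rw [PySem.Str.len_eq, hcs]; rfl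
    rw [if_pos hlen, if_pos hlen]
  | [c0] =>
    have hlen : PySem.Str.len s = 1 := by rw [PySem.Str.len_eq, hcs]; rfl
    have hz : ¬ (PySem.Str.len s = 0) := by rw [hlen]; norm_num
    have hsw : PySem.Str.startswith s "0x" = false := by
      rw [PySem.Str.startswith_eq, hcs, Bool.eq_false_iff]
      intro h
      have hp := (PySem.Chars.startswith_iff _ _).mp h
      have := hp.length_le
      simp at this
    rw [if_neg hz, if_neg hz, hsw]
    simp
  | c0 :: c1 :: rest =>
    have hlen : PySem.Str.len s = ((rest.length + 2 : Nat) : Int) := by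
      rw [PySem.Str.len_eq, hcs]; simp only [List.length_cons]
    have hz : ¬ (PySem.Str.len s = 0) := by rw [hlen]; push_cast; omega
    have hsw : PySem.Str.startswith s "0x" = (c0 == '0' && c1 == 'x') := by
      rw [PySem.Str.startswith_eq, hcs, Bool.eq_iff_iff, PySem.Chars.startswith_iff]
      show ('0' :: 'x' :: [] <+: _) ↔ _
      simp only [List.cons_prefix_cons, List.nil_prefix, and_true, Bool.and_eq_true, beq_iff_eq]
      exact ⟨fun ⟨h1, h2⟩ => ⟨h1.symm, h2.symm⟩, fun ⟨h1, h2⟩ => ⟨h1.symm, h2.symm⟩⟩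
    rw [if_neg hz, if_neg hz, hsw]
    by_cases h01 : c0 = '0' ∧ c1 = 'x'
    · obtain ⟨rfl, rfl⟩ := h01
      have htail : (PySem.Str.slice s (some 2) none).toList = rest := by
        rw [PySem.Str.toList_slice, hcs, PySem.Chars.slice_eq_listSlice,
          PySem.List.slice_from _ (by norm_num : (0:Int) ≤ 2)]
        rfl
      have hall : rest.all (fun c => PySem.Chars.isIn [c] "0123456789abcdefABCDEF".toList)
          = rest.all pvIsHexChar :=
        List.all_congr rfl isIn_hex_eq_pvIsHexChar
      by_cases h64 : rest.length = 64
      · have h66 : ¬ (PySem.Str.len s ≠ 66) := by rw [hlen, h64]; norm_num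
        rw [if_neg h66, htail, hall]
        simp [pvHexRun_eq, h64]
      · have h66 : PySem.Str.len s ≠ 66 := by rw [hlen]; push_cast; omega
        rw [if_pos h66]
        simp [pvHexRun_eq, h64]
    · have hne : (c0 == '0' && c1 == 'x') = false := by
        rw [Bool.and_eq_false_iff]
        by_cases h0 : c0 = '0'
        · right; rw [beq_eq_false_iff_ne]; intro h1; exact h01 ⟨h0, h1⟩
        · left; rw [beq_eq_false_iff_ne]; exact h0
      rw [hne]
      simp
      intro h0 h1
      exact absurd ⟨h0, h1⟩ h01
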